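-- pv_equiv track=rewrite | github.com/aryanxraina/healthnet_final_year | healthnet-project/backend/ai/assistant_ai.py | get_sentiment_trend
-- ===== SOURCE A (Python) =====
-- from typing import Dict, List, Any, Optional
--
-- def get_sentiment_trend(conversation_history: List[Dict[str, Any]]) -> str:
--     """Get sentiment trend from conversation history"""
--     if not conversation_history:
--         return "neutral"
--
--     recent_sentiments = [conv.get("sentiment", "neutral") for conv in conversation_history[-10:]]
--     positive_count = recent_sentiments.count("positive")
--     negative_count = recent_sentiments.count("negative")
--
--     if positive_count > negative_count:
--         return "improving"
--     elif negative_count > positive_count: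
--         return "declining"
--     else:
--         return "stable"
-- ===== SOURCE B (Python) =====
-- def get_sentiment_trend(conversation_history):
--     """Get sentiment trend from conversation history"""
--     if not conversation_history:
--         return "neutral"
--     # Cancellation stack: opposite sentiments annihilate pairwise; the
--     # surviving homogeneous stack (if any) names the dominant sentiment.
--     stack = []
--     for conv in conversation_history[-10:]:
--         s = conv.get("sentiment", "neutral")
--         if s == "positive" or s == "negative":
--             if stack and stack[-1] != s:
--                 stack.pop()
--             else:
--                 stack.append(s)
--     if not stack:
--         return "stable"
--     return "improving" if stack[-1] == "positive" else "declining"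
-- ===== Notes on version B (the rewrite author's own statement) =====
-- stated objective: alternative
-- what changed: Replaces the two .count passes and three-way count comparison with a Boyer-Moore-style cancellation stack: opposite sentiments annihilate pairwise during one pass, and the surviving homogeneous stack's top symbol (or emptiness) determines the trend with no counting or comparison of counts.
import Mathlib
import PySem

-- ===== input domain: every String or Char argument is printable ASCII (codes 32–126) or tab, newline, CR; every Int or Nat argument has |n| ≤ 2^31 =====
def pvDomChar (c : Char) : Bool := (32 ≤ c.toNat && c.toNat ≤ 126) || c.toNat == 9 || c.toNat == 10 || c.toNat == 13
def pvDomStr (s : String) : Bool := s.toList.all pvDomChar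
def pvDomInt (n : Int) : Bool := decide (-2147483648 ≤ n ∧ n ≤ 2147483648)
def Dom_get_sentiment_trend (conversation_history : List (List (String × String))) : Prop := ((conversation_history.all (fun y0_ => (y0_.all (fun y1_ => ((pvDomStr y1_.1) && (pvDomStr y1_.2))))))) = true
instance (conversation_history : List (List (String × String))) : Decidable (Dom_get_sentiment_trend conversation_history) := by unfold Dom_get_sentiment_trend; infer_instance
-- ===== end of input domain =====

-- B replaces the two .count passes and count comparison with a pairwise-cancellation stack
-- whose surviving top symbol decides the trend (alternative decomposition; return value only).
-- ===== PORT A =====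
def get_sentiment_trend (conversation_history : List (List (String × String))) : String :=
  if conversation_history = [] then "neutral"
  else
    let recent_sentiments := (PySem.List.slice conversation_history (some (-10)) none).map
      (fun conv => (PySem.Dict.mk conv).getD "sentiment" "neutral")
    let positive_count := recent_sentiments.count "positive"
    let negative_count := recent_sentiments.count "negative"
    if positive_count > negative_count then "improving"
    else if negative_count > positive_count then "declining"
    else "stable"

-- ===== PORT B =====
-- stack represented head-first (head = Python's stack[-1], the top)
def pvStepS (st : List String) (s : String) : List String :=
  if s = "positive" ∨ s = "negative" then
    match st with
    | t :: r => if t ≠ s then r else s :: t :: r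
    | [] => [s]
  else st

def pvStep (st : List String) (conv : List (String × String)) : List String :=
  pvStepS st ((PySem.Dict.mk conv).getD "sentiment" "neutral")

def get_sentiment_trend_alt (conversation_history : List (List (String × String))) : String :=
  if conversation_history = [] then "neutral"
  else
    match (PySem.List.slice conversation_history (some (-10)) none).foldl pvStep [] with
    | [] => "stable"
    | t :: _ => if t = "positive" then "improving" else "declining"

-- ===== PRECONDITION & SPEC =====
def Spec_get_sentiment_trend (conversation_history : List (List (String × String))) (out : String) : Prop := out = get_sentiment_trend_alt conversation_history
instance (conversation_history : List (List (String × String))) (out : String) : Decidable (Spec_get_sentiment_trend conversation_history out) := by unfold Spec_get_sentiment_trend; infer_instance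

-- ===== CLAIM (what is proved, stated in full; the proofs are below) =====
def Claim_equal_get_sentiment_trend : Prop := ∀ (conversation_history : List (List (String × String))), Dom_get_sentiment_trend conversation_history → Spec_get_sentiment_trend conversation_history (get_sentiment_trend conversation_history)

-- ===== LEMMAS AND PROOFS =====
-- invariant: the stack is always a run of a single sentiment symbol
def pvInv (st : List String) : Prop :=
  (∃ k, st = List.replicate k "positive") ∨ (∃ k, st = List.replicate k "negative")

-- signed height of the stack
def pvVal : List String → Int
  | [] => 0
  | h :: t => if h = "positive" then ((h :: t).length : Int) else -((h :: t).length : Int)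

lemma pvRepl_cons {k : Nat} {x t : String} {r : List String}
    (h : t :: r = List.replicate k x) : t = x ∧ r = List.replicate (k - 1) x := by
  cases k <;> simp_all [List.replicate]

lemma pvVal_repl_pos (k : Nat) : pvVal (List.replicate k "positive") = (k : Int) := by
  cases k <;> simp [pvVal, List.replicate]

lemma pvVal_repl_neg (k : Nat) : pvVal (List.replicate k "negative") = -(k : Int) := by
  cases k <;> simp [pvVal, List.replicate]

lemma pvStepS_spec (st : List String) (s : String) (h : pvInv st) :
    pvInv (pvStepS st s) ∧
    pvVal (pvStepS st s) = pvVal st +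
      (if s = "positive" then 1 else if s = "negative" then -1 else 0) := by
  by_cases hp : s = "positive"
  · subst hp
    cases st with
    | nil => exact ⟨Or.inl ⟨1, rfl⟩, by simp [pvStepS, pvVal]⟩
    | cons t r =>
      rcases h with ⟨k, hk⟩ | ⟨k, hk⟩
      · obtain ⟨ht, hr⟩ := pvRepl_cons hk
        subst ht
        constructor
        · exact Or.inl ⟨k + 1, by simp [pvStepS, hk, List.replicate_succ]⟩
        · simp [pvStepS, pvVal]
      · obtain ⟨ht, hr⟩ := pvRepl_cons hk
        subst ht
        have hklen : k = r.length + 1 := by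
          have := congrArg List.length hk; simpa using this.symm
        constructor
        · exact Or.inr ⟨k - 1, by simp [pvStepS, hr]⟩
        · rw [show pvStepS ("negative" :: r) "positive" = r from by simp [pvStepS]]
          rw [show pvVal ("negative" :: r) = -(((r.length : Int)) + 1) from by simp [pvVal]]
          rw [hr, pvVal_repl_neg, hklen]
          simp
  · by_cases hn : s = "negative"
    · subst hn
      cases st with
      | nil => exact ⟨Or.inr ⟨1, rfl⟩, by simp [pvStepS, pvVal]⟩
      | cons t r =>
        rcases h with ⟨k, hk⟩ | ⟨k, hk⟩
        · obtain ⟨ht, hr⟩ := pvRepl_cons hk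
          subst ht
          have hklen : k = r.length + 1 := by
            have := congrArg List.length hk; simpa using this.symm
          constructor
          · exact Or.inl ⟨k - 1, by simp [pvStepS, hr]⟩
          · rw [show pvStepS ("positive" :: r) "negative" = r from by simp [pvStepS]]
            rw [show pvVal ("positive" :: r) = ((r.length : Int)) + 1 from by simp [pvVal]]
            rw [hr, pvVal_repl_pos, hklen]
            simp
        · obtain ⟨ht, hr⟩ := pvRepl_cons hk
          subst ht
          constructor
          · exact Or.inr ⟨k + 1, by simp [pvStepS, hk, List.replicate_succ]⟩
          · rw [show pvStepS ("negative" :: r) "negative" = "negative" :: "negative" :: r from by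
              simp [pvStepS]]
            simp [pvVal]; ring
    · refine ⟨?_, ?_⟩ <;> simp [pvStepS, hp, hn, h]

lemma foldl_pvStep_spec (l : List (List (String × String))) (st : List String) (h : pvInv st) :
    pvInv (l.foldl pvStep st) ∧
    pvVal (l.foldl pvStep st) = pvVal st +
      (((l.map (fun conv => (PySem.Dict.mk conv).getD "sentiment" "neutral")).count "positive" : Int)
       - ((l.map (fun conv => (PySem.Dict.mk conv).getD "sentiment" "neutral")).count "negative" : Int)) := by
  induction l generalizing st with
  | nil => simpa using h
  | cons c t ih =>
    obtain ⟨hi, hv⟩ := pvStepS_spec st ((PySem.Dict.mk c).getD "sentiment" "neutral") h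
    rw [show pvStepS st ((PySem.Dict.mk c).getD "sentiment" "neutral") = pvStep st c from rfl] at hi hv
    obtain ⟨hi', hv'⟩ := ih (pvStep st c) hi
    refine ⟨hi', ?_⟩
    simp only [List.foldl_cons, List.map_cons, List.count_cons] at *
    rw [hv', hv]
    split_ifs <;> simp_all <;> ring

-- ===== VERDICT (by name: the statement is the Claim_ definition above) =====
theorem get_sentiment_trend_spec : Claim_equal_get_sentiment_trend := by
  intro ch _
  unfold Spec_get_sentiment_trend get_sentiment_trend get_sentiment_trend_alt
  by_cases hch : ch = []
  · simp [hch]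
  · simp only [if_neg hch]
    set l := PySem.List.slice ch (some (-10)) none with hl
    set p := (l.map (fun conv => (PySem.Dict.mk conv).getD "sentiment" "neutral")).count "positive" with hp
    set n := (l.map (fun conv => (PySem.Dict.mk conv).getD "sentiment" "neutral")).count "negative" with hn
    obtain ⟨hi, hv⟩ := foldl_pvStep_spec l [] (Or.inl ⟨0, rfl⟩)
    simp only [pvVal, zero_add] at hv
    cases hst : l.foldl pvStep [] with
    | nil =>
      rw [hst] at hv
      simp at hv
      have : p = n := by omega
      simp [this]
    | cons t r =>
      rw [hst] at hv hi
      rcases hi with ⟨k, hk⟩ | ⟨k, hk⟩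
      · have ht : t = "positive" := by
          cases k with
          | zero => simp at hk
          | succ k => simpa [List.replicate] using congrArg (·.headI) hk
        have hgt : p > n := by
          rw [ht] at hv; simp at hv; omega
        simp [ht, if_pos hgt]
      · have ht : t = "negative" := by
          cases k with
          | zero => simp at hk
          | succ k => simpa [List.replicate] using congrArg (·.headI) hk
        have hgt : n > p := by
          rw [ht] at hv; simp at hv; omega
        have : ¬ p > n := by omega
        rw [ht]
        simp [if_neg this, if_pos hgt]
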